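-- pv_equiv track=rewrite | github.com/KoGaYoung/Algorithm | 알고리즘/Python/테스트/넷마블3.py | solution
-- ===== SOURCE A (Python) =====
-- def solution(queries):
--     '''
--     배열을 반씩 잘라서 홀수는 중간원소 빼기
--     비교해가며 앞배열과 뒷배열의 원소가 똑같아질 때까지 뺴야함
--     각 col별로 최소값이 될 때까지 빼는 것.
--     '''
--     answer = []
--     for turn in queries:
--         f = turn[:int(len(turn)/2)]
--         b = turn[int(len(turn)/2) if len(turn) % 2 == 0 else int(len(turn)/2)+1:]
--
--         if f == b:  # f:[0,1] b:[0,1]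
--             answer.append(0)
--         else:
--             c_minus = 0
--             for i in range(0, len(f)):
--                 c_minus += abs(f[i] - b[i])
--             if c_minus % 2 == 0:
--                 answer.append(0)
--             else:
--                 answer.append(1)
--     return answer
-- ===== SOURCE B (Python) =====
-- def solution(queries):
--     # Parity of sum(|front[i] - back[i]|) equals parity of the whole-array sum
--     # minus the unpaired middle element (|a-b| and a+b have the same parity).
--     answer = []
--     for turn in queries:
--         total = sum(turn)
--         if len(turn) % 2 == 1:
--             total -= turn[len(turn) // 2]
--         answer.append(total % 2)
--     return answer
-- ===== Notes on version B (the rewrite author's own statement) =====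
-- stated objective: simpler
-- what changed: Replaces the front/back split and the per-pair absolute-difference loop by a single sum of the whole array (minus the middle element when the length is odd) taken mod 2, using the fact that |a-b| and a+b have the same parity.
import Mathlib
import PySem

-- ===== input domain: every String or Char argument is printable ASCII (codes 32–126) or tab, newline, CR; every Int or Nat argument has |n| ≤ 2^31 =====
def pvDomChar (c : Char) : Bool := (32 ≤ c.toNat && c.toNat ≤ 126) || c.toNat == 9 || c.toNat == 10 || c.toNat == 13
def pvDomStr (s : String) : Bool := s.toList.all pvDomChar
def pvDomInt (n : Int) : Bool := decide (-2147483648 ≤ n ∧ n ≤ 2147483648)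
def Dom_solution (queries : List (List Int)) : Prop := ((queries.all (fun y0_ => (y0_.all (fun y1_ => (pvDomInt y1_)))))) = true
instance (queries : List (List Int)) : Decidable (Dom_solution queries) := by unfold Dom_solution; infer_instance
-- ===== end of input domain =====

-- B replaces A's front/back split and per-pair abs-difference loop by the parity of the
-- whole-array sum minus the unpaired middle element (simpler; same asymptotic cost).


-- ===== PORT A =====
-- one iteration of A's `for turn in queries` body.
-- `int(len(turn)/2)` equals `len(turn) / 2` on Nat (exact for any list length in scope).
-- Indices `f[i]`, `b[i]` with i in range(len(f)) are always in range (len b = len f),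
-- so pyGetD is exact here (Python never raises).
def solutionStep (turn : List Int) : Int :=
  let f := PySem.List.slice turn none (some ((turn.length / 2 : Nat) : Int))
  let b := PySem.List.slice turn
      (some (if turn.length % 2 == 0 then ((turn.length / 2 : Nat) : Int)
             else ((turn.length / 2 + 1 : Nat) : Int))) none
  if f = b then 0
  else
    let cMinus := (PySem.List.pyRange 0 (f.length : Int)).foldl
      (fun acc i => acc + |PySem.List.pyGetD f i 0 - PySem.List.pyGetD b i 0|) 0
    if PySem.Int.mod cMinus 2 = 0 then 0 else 1

def solution (queries : List (List Int)) : List Int :=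
  queries.foldl (fun answer turn => answer ++ [solutionStep turn]) []

-- ===== PORT B =====
-- when the length is odd it is positive, so turn[len(turn)//2] is always in range.
def solution_alt (queries : List (List Int)) : List Int :=
  queries.map (fun turn =>
    let total := turn.foldl (fun acc x => acc + x) 0
    let total2 := if turn.length % 2 == 1
      then total - PySem.List.pyGetD turn ((turn.length / 2 : Nat) : Int) 0
      else total
    PySem.Int.mod total2 2)

-- ===== PRECONDITION & SPEC =====
def Spec_solution (queries : List (List Int)) (out : List Int) : Prop := out = solution_alt queries
instance (queries : List (List Int)) (out : List Int) : Decidable (Spec_solution queries out) := by unfold Spec_solution; infer_instance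

-- ===== CLAIM (what is proved, stated in full; the proofs are below) =====
def Claim_equal_solution : Prop := ∀ (queries : List (List Int)), Dom_solution queries → Spec_solution queries (solution queries)

-- ===== LEMMAS AND PROOFS =====

-- parity of the indexed abs-difference sum equals parity of the two sums added
lemma absdiff_parity (f : List Int) : ∀ (b : List Int), f.length = b.length →
    ((List.range f.length).map (fun i => |f.getD i 0 - b.getD i 0|)).sum % 2
      = (f.sum + b.sum) % 2 := by
  induction f with
  | nil => intro b hb; simp [(List.length_eq_zero_iff).mp hb.symm]
  | cons x f ih =>
    intro b hb
    cases b with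
    | nil => simp at hb
    | cons y b =>
      simp only [List.length_cons, Nat.add_right_cancel_iff] at hb
      simp only [List.length_cons]
      rw [List.range_succ_eq_map]
      simp only [List.map_cons, List.map_map, List.sum_cons, List.sum_cons]
      have h1 : ((List.range f.length).map
          ((fun i => |(x :: f).getD i 0 - (y :: b).getD i 0|) ∘ Nat.succ)).sum
          = ((List.range f.length).map (fun i => |f.getD i 0 - b.getD i 0|)).sum := by
        simp [Function.comp_def]
      rw [h1]
      simp only [List.getD_cons_zero]
      have h2 := ih b hb
      rcases abs_cases (x - y) with ⟨he, _⟩ | ⟨he, _⟩ <;> rw [he] <;> omega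

lemma step_eq (turn : List Int) :
    solutionStep turn =
      (fun turn =>
        let total := turn.foldl (fun acc x => acc + x) 0
        let total2 := if turn.length % 2 == 1
          then total - PySem.List.pyGetD turn ((turn.length / 2 : Nat) : Int) 0
          else total
        PySem.Int.mod total2 2) turn := by
  unfold solutionStep
  -- name the pieces
  set n := turn.length with hn
  have hslice_f : PySem.List.slice turn none (some ((n / 2 : Nat) : Int)) = turn.take (n / 2) :=
    PySem.List.slice_to_natCast turn (n / 2)
  -- B's total is the list sum
  have htot : turn.foldl (fun acc x => acc + x) 0 = turn.sum := by
    rw [PySem.List.foldl_add turn (fun x => x) 0]; simp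
  -- case on parity of the length
  by_cases hpar : n % 2 = 0
  · -- even length
    have hb : (if n % 2 == 0 then ((n / 2 : Nat) : Int) else ((n / 2 + 1 : Nat) : Int))
        = ((n / 2 : Nat) : Int) := by simp [hpar]
    rw [hb, hslice_f, PySem.List.slice_from_natCast turn (n / 2)]
    have hlf : (turn.take (n / 2)).length = n / 2 := by
      simp [hn]; omega
    have hlb : (turn.drop (n / 2)).length = n / 2 := by
      simp [hn]; omega
    have hsum : (turn.take (n / 2)).sum + (turn.drop (n / 2)).sum = turn.sum := by
      rw [← List.sum_append, List.take_append_drop]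
    have hkey := absdiff_parity (turn.take (n / 2)) (turn.drop (n / 2)) (by rw [hlf, hlb])
    simp only [htot]
    have hif : (n % 2 == 1) = false := by simp [hpar]
    rw [hif]
    simp only [if_false, Bool.false_eq_true]
    -- reduce A's loop to the mapped sum
    rw [PySem.List.pyRange_zero_natCast, PySem.List.foldl_add]
    simp only [List.map_map, Function.comp_def, PySem.List.pyGetD_natCast]
    rw [PySem.Int.mod_eq_emod_of_pos (by norm_num), PySem.Int.mod_eq_emod_of_pos (by norm_num)]
    split_ifs with hfb hc
    · -- f = b: sums are equal, total even
      rw [hfb] at hsum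
      omega
    · omega
    · omega
  · -- odd length
    have hn2 : n % 2 = 1 := by omega
    have hb : (if n % 2 == 0 then ((n / 2 : Nat) : Int) else ((n / 2 + 1 : Nat) : Int))
        = ((n / 2 + 1 : Nat) : Int) := by simp [hn2]
    rw [hb, hslice_f, PySem.List.slice_from_natCast turn (n / 2 + 1)]
    have hlt : n / 2 < n := by omega
    have hlf : (turn.take (n / 2)).length = n / 2 := by simp [hn]; omega
    have hlb : (turn.drop (n / 2 + 1)).length = n / 2 := by simp [hn]; omega
    -- turn[n/2] in B
    have hget : PySem.List.pyGetD turn ((n / 2 : Nat) : Int) 0 = turn.getD (n / 2) 0 :=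
      PySem.List.pyGetD_natCast turn (n / 2) 0
    have hmid : turn.getD (n / 2) 0 = turn[n / 2]'hlt := by
      simp [List.getD_eq_getElem?_getD, List.getElem?_eq_getElem hlt]
    have hdropsplit : turn.drop (n / 2) = turn[n / 2]'hlt :: turn.drop (n / 2 + 1) :=
      List.drop_eq_getElem_cons hlt
    have hsum : (turn.take (n / 2)).sum + turn[n / 2]'hlt + (turn.drop (n / 2 + 1)).sum
        = turn.sum := by
      have := List.take_append_drop (n / 2) turn
      calc (turn.take (n / 2)).sum + turn[n / 2]'hlt + (turn.drop (n / 2 + 1)).sum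
          = (turn.take (n / 2)).sum + (turn.drop (n / 2)).sum := by
            rw [hdropsplit, List.sum_cons]; ring
        _ = turn.sum := by rw [← List.sum_append, List.take_append_drop]
    have hkey := absdiff_parity (turn.take (n / 2)) (turn.drop (n / 2 + 1)) (by rw [hlf, hlb])
    simp only [htot]
    have hif : (n % 2 == 1) = true := by simp [hn2]
    rw [hif]
    simp only [if_true]
    rw [hget, hmid]
    rw [PySem.List.pyRange_zero_natCast, PySem.List.foldl_add]
    simp only [List.map_map, Function.comp_def, PySem.List.pyGetD_natCast]
    rw [PySem.Int.mod_eq_emod_of_pos (by norm_num), PySem.Int.mod_eq_emod_of_pos (by norm_num)]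
    split_ifs with hfb hc
    · rw [hfb] at hsum; omega
    · omega
    · omega

-- ===== VERDICT (by name: the statement is the Claim_ definition above) =====
theorem solution_spec : Claim_equal_solution := by
  intro queries _
  unfold Spec_solution solution solution_alt
  rw [PySem.List.foldl_append_singleton_eq_map]
  exact List.map_congr_left (fun turn _ => step_eq turn)
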